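-- pv_equiv track=rewrite | github.com/thiagocfaria/JAVIS-DAVI | jarvis/aprendizado/learner.py | _keys_to_text
-- ===== SOURCE A (Python) =====
-- def _keys_to_text(keys: list[str]) -> str:
--     """Convert key sequence to typed text."""
--     text_parts = []
--
--     for key in keys:
--         if key.startswith("Key."):
--             # Handle special keys
--             if key == "Key.space":
--                 text_parts.append(" ")
--             elif key == "Key.enter":
--                 text_parts.append("\n")
--             elif key == "Key.tab":
--                 text_parts.append("\t")
--             elif key == "Key.backspace":
--                 if text_parts:
--                     text_parts.pop()
--             # Skip other special keys
--         else:
--             text_parts.append(key)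
--
--     return "".join(text_parts)
-- ===== SOURCE B (Python) =====
-- _PRODUCES = {"Key.space": " ", "Key.enter": "\n", "Key.tab": "\t"}
--
-- def _keys_to_text(keys: list) -> str:
--     # Reverse scan with a pending-backspace counter instead of building and popping a list.
--     skip = 0
--     out = []
--     for key in reversed(keys):
--         if key == "Key.backspace":
--             skip += 1
--         elif key.startswith("Key."):
--             ch = _PRODUCES.get(key)
--             if ch is not None:
--                 if skip:
--                     skip -= 1
--                 else:
--                     out.append(ch)
--             # other special keys: no emit, no skip change
--         else:
--             if skip:
--                 skip -= 1
--             else: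
--                 out.append(key)
--     out.reverse()
--     return "".join(out)
-- ===== Notes on version B (the rewrite author's own statement) =====
-- stated objective: alternative
-- what changed: B scans the keys in reverse with a pending-backspace counter and a dict lookup for special keys, instead of A's forward pass that appends to a buffer and pops on each backspace.
import Mathlib
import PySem

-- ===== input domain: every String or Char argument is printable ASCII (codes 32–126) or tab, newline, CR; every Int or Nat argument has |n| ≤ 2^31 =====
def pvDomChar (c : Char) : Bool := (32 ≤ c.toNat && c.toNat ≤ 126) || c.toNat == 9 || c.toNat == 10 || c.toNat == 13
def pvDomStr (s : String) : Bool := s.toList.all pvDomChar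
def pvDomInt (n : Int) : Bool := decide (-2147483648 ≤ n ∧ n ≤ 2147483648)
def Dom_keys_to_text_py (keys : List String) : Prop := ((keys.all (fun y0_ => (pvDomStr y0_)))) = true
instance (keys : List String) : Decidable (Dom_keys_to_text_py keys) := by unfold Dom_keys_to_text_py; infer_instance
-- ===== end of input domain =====

-- B replaces A's forward append/pop buffer by a reverse scan with a pending-backspace counter (alternative decomposition, same cost).

-- ===== PORT A =====
-- one loop step of A's for-loop over text_parts
def stepA (parts : List String) (key : String) : List String :=
  if PySem.Str.startswith key "Key." then
    if key = "Key.space" then parts ++ [" "]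
    else if key = "Key.enter" then parts ++ ["\n"]
    else if key = "Key.tab" then parts ++ ["\t"]
    else if key = "Key.backspace" then parts.dropLast
    else parts
  else parts ++ [key]

def keys_to_text_py (keys : List String) : String :=
  PySem.Str.join "" (keys.foldl stepA [])

-- ===== PORT B =====
-- _PRODUCES.get(key): the character a special key produces, none otherwise (literal dict lookup)
def producesB (key : String) : Option String :=
  if key = "Key.space" then some " "
  else if key = "Key.enter" then some "\n"
  else if key = "Key.tab" then some "\t"
  else none

-- B's reverse loop: emits (in reverse order) with a pending-backspace counter
def goB : List String → Nat → List String
  | [], _ => []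
  | key :: rest, skip =>
    if key = "Key.backspace" then goB rest (skip + 1)
    else if PySem.Str.startswith key "Key." then
      match producesB key with
      | some ch => if skip ≠ 0 then goB rest (skip - 1) else ch :: goB rest 0
      | none => goB rest skip
    else if skip ≠ 0 then goB rest (skip - 1) else key :: goB rest 0

def keys_to_text_py_alt (keys : List String) : String :=
  PySem.Str.join "" (goB keys.reverse 0).reverse

-- ===== PRECONDITION & SPEC =====
def Spec_keys_to_text_py (keys : List String) (out : String) : Prop := out = keys_to_text_py_alt keys
instance (keys : List String) (out : String) : Decidable (Spec_keys_to_text_py keys out) := by unfold Spec_keys_to_text_py; infer_instance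

-- ===== CLAIM (what is proved, stated in full; the proofs are below) =====
def Claim_equal_keys_to_text_py : Prop := ∀ (keys : List String), Dom_keys_to_text_py keys → Spec_keys_to_text_py keys (keys_to_text_py keys)

-- ===== LEMMAS AND PROOFS =====

-- emitting case, shared between the three special producers and an ordinary key
theorem emit_eq (P : List String) (c : String) (skip : Nat) :
    (if skip ≠ 0 then (P.take (P.length - (skip - 1))).reverse
     else c :: (P.take (P.length - 0)).reverse)
    = ((P ++ [c]).take ((P ++ [c]).length - skip)).reverse := by
  by_cases h : skip = 0
  · subst h
    have hfull : (P ++ [c]).take ((P ++ [c]).length - 0) = P ++ [c] := by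
      rw [Nat.sub_zero, List.take_length]
    rw [hfull]
    simp
  · have hle : P.length + 1 - skip ≤ P.length := by omega
    simp only [h, if_true, ne_eq, not_false_iff, List.length_append,
      List.length_cons, List.length_nil]
    rw [List.take_append_of_le_length (by simpa using hle)]
    congr 2
    omega

-- Invariant: B's reverse loop with `skip` pending backspaces produces (reversed)
-- A's buffer for the already-unread prefix, with its last `skip` elements dropped.
theorem goB_eq (l : List String) : ∀ skip : Nat,
    goB l skip =
      ((l.reverse.foldl stepA []).take ((l.reverse.foldl stepA []).length - skip)).reverse := by
  induction l with
  | nil => intro skip; simp [goB]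
  | cons key rest ih =>
    intro skip
    have hfold : (key :: rest).reverse.foldl stepA [] =
        stepA (rest.reverse.foldl stepA []) key := by
      simp [List.foldl_append]
    set P := rest.reverse.foldl stepA [] with hP
    by_cases hb : key = "Key.backspace"
    · subst hb
      have hstep : stepA P "Key.backspace" = P.dropLast := by
        simp [stepA, show PySem.Chars.startswith ['K','e','y','.','b','a','c','k','s','p','a','c','e'] ['K','e','y','.'] = true from by decide]
      rw [show goB ("Key.backspace" :: rest) skip = goB rest (skip + 1) from by simp [goB],
        ih (skip + 1), hfold, hstep, List.dropLast_eq_take, List.take_take]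
      congr 2
      rw [List.length_take]
      omega
    · by_cases hst : PySem.Str.startswith key "Key." = true
      · have hst' : PySem.Chars.startswith key.toList ['K','e','y','.'] = true := by
          simpa [PySem.Str.startswith] using hst
        rcases hprod : producesB key with _ | c
        · -- ignored special key: neither program changes its state
          have h1 : key ≠ "Key.space" := by
            intro h; subst h; simp [producesB] at hprod
          have h2 : key ≠ "Key.enter" := by
            intro h; subst h; simp [producesB] at hprod
          have h3 : key ≠ "Key.tab" := by
            intro h; subst h; simp [producesB] at hprod
          have hstep : stepA P key = P := by
            simp [stepA, hst', h1, h2, h3, hb]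
          rw [show goB (key :: rest) skip = goB rest skip from by
            simp [goB, hb, hst', hprod], ih skip, hfold, hstep]
        · -- one of the three producers: A appends c, B emits c (or consumes a backspace)
          have hkey : (key = "Key.space" ∧ c = " ") ∨ (key = "Key.enter" ∧ c = "\n")
              ∨ (key = "Key.tab" ∧ c = "\t") := by
            by_cases k1 : key = "Key.space"
            · subst k1; simp [producesB] at hprod; exact Or.inl ⟨rfl, hprod.symm⟩
            · by_cases k2 : key = "Key.enter"
              · subst k2; simp [producesB] at hprod; exact Or.inr (Or.inl ⟨rfl, hprod.symm⟩)
              · by_cases k3 : key = "Key.tab"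
                · subst k3; simp [producesB] at hprod; exact Or.inr (Or.inr ⟨rfl, hprod.symm⟩)
                · simp [producesB, k1, k2, k3] at hprod
          have hstep : stepA P key = P ++ [c] := by
            rcases hkey with ⟨hk, hc⟩ | ⟨hk, hc⟩ | ⟨hk, hc⟩ <;> subst hk <;> subst hc
            · simp [stepA, show PySem.Chars.startswith ['K','e','y','.','s','p','a','c','e'] ['K','e','y','.'] = true from by decide]
            · simp [stepA, show PySem.Chars.startswith ['K','e','y','.','e','n','t','e','r'] ['K','e','y','.'] = true from by decide]
            · simp [stepA, show PySem.Chars.startswith ['K','e','y','.','t','a','b'] ['K','e','y','.'] = true from by decide]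
          have hgo : goB (key :: rest) skip =
              if skip ≠ 0 then goB rest (skip - 1) else c :: goB rest 0 := by
            simp [goB, hb, hst', hprod]
          rw [hgo, hfold, hstep, ← emit_eq]
          by_cases h : skip = 0 <;> simp [h, ih]
      · -- ordinary key: A appends it, B emits it (or consumes a backspace)
        have hst' : PySem.Chars.startswith key.toList ['K','e','y','.'] = false := by
          simpa [PySem.Str.startswith] using hst
        have hstep : stepA P key = P ++ [key] := by simp [stepA, hst']
        have hgo : goB (key :: rest) skip =
            if skip ≠ 0 then goB rest (skip - 1) else key :: goB rest 0 := by
          simp [goB, hb, hst']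
        rw [hgo, hfold, hstep, ← emit_eq]
        by_cases h : skip = 0 <;> simp [h, ih]

-- ===== VERDICT (by name: the statement is the Claim_ definition above) =====
theorem keys_to_text_py_spec : Claim_equal_keys_to_text_py := by
  intro keys _
  show keys_to_text_py keys = keys_to_text_py_alt keys
  rw [keys_to_text_py, keys_to_text_py_alt, goB_eq]
  simp
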